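-- pv_equiv track=rewrite | github.com/FranRovi/Algorithms | Leet_Code/Easy/findIndicesWithIndexAndValueDifferenceI.py | findIndicesWithIndexAndValueDifferenceI
-- ===== SOURCE A (Python) =====
-- def findIndicesWithIndexAndValueDifferenceI(nums, indexDifference, valueDifference):
--     if len(nums) == 1 and indexDifference == 0 and valueDifference == 0:
--         return [0, 0]
--     answer = []
--     for i in range(len(nums) - 1):
--         for j in range(i+1, len(nums)):
--             if (abs(nums[i] - nums[j]) >= valueDifference and
--                 abs(i - j) >= indexDifference):
--                     answer.append(i)
--                     answer.append(j)
--                     return answer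
--     answer.append(-1)
--     answer.append(-1)
--     return answer
-- ===== SOURCE B (Python) =====
-- def findIndicesWithIndexAndValueDifferenceI(nums, indexDifference, valueDifference):
--     # O(n): suffix (min,max) table decides in O(1) per i whether a valid j exists;
--     # the inner scan runs at most once (it is guaranteed to succeed).
--     n = len(nums)
--     if n == 1 and indexDifference == 0 and valueDifference == 0:
--         return [0, 0]
--     # ext[k] = (min, max) of nums[k:], built right-to-left
--     ext = []
--     lo = hi = 0
--     for k in range(n - 1, -1, -1):
--         x = nums[k]
--         if ext:
--             lo = min(x, lo)
--             hi = max(x, hi)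
--         else:
--             lo = hi = x
--         ext.append((lo, hi))
--     ext.reverse()
--     step = indexDifference if indexDifference > 1 else 1
--     for i in range(n - step):
--         x = nums[i]
--         j0 = i + step
--         lo, hi = ext[j0]
--         if x - lo >= valueDifference or hi - x >= valueDifference:
--             for j in range(j0, n):
--                 if abs(x - nums[j]) >= valueDifference:
--                     return [i, j]
--     return [-1, -1]
-- ===== Notes on version B (the rewrite author's own statement) =====
-- stated objective: faster
-- what changed: Replaces A's O(n^2) nested scan by a precomputed suffix (min,max) table: for each i a constant-time test on the suffix extremes decides whether any valid j exists, so the inner scan over j runs at most once (when it is guaranteed to succeed).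
import Mathlib
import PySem

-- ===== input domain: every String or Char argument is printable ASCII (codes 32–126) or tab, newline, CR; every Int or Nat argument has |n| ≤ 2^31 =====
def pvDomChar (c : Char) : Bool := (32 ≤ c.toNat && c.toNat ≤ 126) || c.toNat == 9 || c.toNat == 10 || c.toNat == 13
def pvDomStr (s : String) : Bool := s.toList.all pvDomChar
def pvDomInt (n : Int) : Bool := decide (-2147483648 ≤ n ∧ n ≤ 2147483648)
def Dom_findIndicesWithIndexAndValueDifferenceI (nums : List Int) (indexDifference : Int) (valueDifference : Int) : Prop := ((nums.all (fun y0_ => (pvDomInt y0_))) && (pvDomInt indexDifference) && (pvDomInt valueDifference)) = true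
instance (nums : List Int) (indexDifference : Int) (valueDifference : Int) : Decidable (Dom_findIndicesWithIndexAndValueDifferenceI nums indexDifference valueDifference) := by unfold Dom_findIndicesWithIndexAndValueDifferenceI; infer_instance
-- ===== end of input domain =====

-- B replaces A's O(n^2) double scan by a suffix (min,max) table that decides in O(1)
-- per i whether a valid j exists, so the inner scan runs at most once (objective: faster).

-- ===== PORT A =====
-- inner 'for j in range(i+1, len(nums))' with early return (findSome? = first hit).
-- Loop indices are the nonnegative ints 0..n-1; they are carried as Nat and cast at
-- each use, so pyGetD/abs see exactly Python's int values.
def fiInnerA (nums : List Int) (indexDifference valueDifference : Int) (i : Nat) : Option (List Int) :=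
  (List.range' (i+1) (nums.length - (i+1))).findSome? (fun (j : Nat) =>
    if valueDifference ≤ |PySem.List.pyGetD nums (i:Int) 0 - PySem.List.pyGetD nums (j:Int) 0| ∧
       indexDifference ≤ |(i:Int) - (j:Int)| then some [(i:Int), (j:Int)] else none)

def findIndicesWithIndexAndValueDifferenceI (nums : List Int) (indexDifference : Int) (valueDifference : Int) : List Int :=
  if nums.length = 1 ∧ indexDifference = 0 ∧ valueDifference = 0 then [0, 0]
  else
    match (List.range (nums.length - 1)).findSome? (fiInnerA nums indexDifference valueDifference) with
    | some r => r
    | none => [-1, -1]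

-- ===== PORT B =====
-- ext[k] = (min, max) of nums[k:]; structural recursion = Source B's right-to-left loop.
def pvSufExt : List Int → List (Int × Int)
  | [] => []
  | x :: xs =>
    match pvSufExt xs with
    | [] => [(x, x)]
    | (lo, hi) :: rest => (min x lo, max x hi) :: (lo, hi) :: rest

-- step = indexDifference if indexDifference > 1 else 1 (a Nat: it is ≥ 1)
def fiStep (indexDifference : Int) : Nat := if 1 < indexDifference then indexDifference.toNat else 1

-- inner 'for j in range(j0, n)' with early return
def fiScanB (nums : List Int) (valueDifference : Int) (i j0 : Nat) : Option (List Int) :=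
  (List.range' j0 (nums.length - j0)).findSome? (fun (j : Nat) =>
    if valueDifference ≤ |PySem.List.pyGetD nums (i:Int) 0 - PySem.List.pyGetD nums (j:Int) 0| then
      some [(i:Int), (j:Int)] else none)

-- body of Source B's outer loop: O(1) guard via the suffix table, then the scan
def fiBodyB (nums : List Int) (ext : List (Int × Int)) (indexDifference valueDifference : Int) (i : Nat) : Option (List Int) :=
  if valueDifference ≤ PySem.List.pyGetD nums (i:Int) 0 - (PySem.List.pyGetD ext ((i + fiStep indexDifference : Nat):Int) (0, 0)).1 ∨
     valueDifference ≤ (PySem.List.pyGetD ext ((i + fiStep indexDifference : Nat):Int) (0, 0)).2 - PySem.List.pyGetD nums (i:Int) 0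
  then fiScanB nums valueDifference i (i + fiStep indexDifference)
  else none

def findIndicesWithIndexAndValueDifferenceI_alt (nums : List Int) (indexDifference : Int) (valueDifference : Int) : List Int :=
  if nums.length = 1 ∧ indexDifference = 0 ∧ valueDifference = 0 then [0, 0]
  else
    match (List.range (nums.length - fiStep indexDifference)).findSome?
        (fiBodyB nums (pvSufExt nums) indexDifference valueDifference) with
    | some r => r
    | none => [-1, -1]

-- ===== PRECONDITION & SPEC =====
def Spec_findIndicesWithIndexAndValueDifferenceI (nums : List Int) (indexDifference : Int) (valueDifference : Int) (out : List Int) : Prop := out = findIndicesWithIndexAndValueDifferenceI_alt nums indexDifference valueDifference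
instance (nums : List Int) (indexDifference : Int) (valueDifference : Int) (out : List Int) : Decidable (Spec_findIndicesWithIndexAndValueDifferenceI nums indexDifference valueDifference out) := by unfold Spec_findIndicesWithIndexAndValueDifferenceI; infer_instance

-- ===== CLAIM (what is proved, stated in full; the proofs are below) =====
def Claim_equal_findIndicesWithIndexAndValueDifferenceI : Prop := ∀ (nums : List Int) (indexDifference : Int) (valueDifference : Int), Dom_findIndicesWithIndexAndValueDifferenceI nums indexDifference valueDifference → Spec_findIndicesWithIndexAndValueDifferenceI nums indexDifference valueDifference (findIndicesWithIndexAndValueDifferenceI nums indexDifference valueDifference)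

-- ===== LEMMAS AND PROOFS =====

theorem findSome?_congr' {α β : Type} (f g : α → Option β) : ∀ (l : List α),
    (∀ a ∈ l, f a = g a) → l.findSome? f = l.findSome? g := by
  intro l
  induction l with
  | nil => intro _; rfl
  | cons x xs ih =>
    intro h
    simp only [List.findSome?_cons, h x (by simp)]
    cases g x with
    | none => exact ih (fun a ha => h a (by simp [ha]))
    | some _ => rfl

theorem range'_split (s a n : Nat) (h1 : s ≤ a) (h2 : a ≤ s + n) :
    List.range' s n = List.range' s (a - s) ++ List.range' a (s + n - a) := by
  have := List.range'_append (s := s) (m := a - s) (n := s + n - a) (step := 1)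
  rw [show s + 1 * (a - s) = a by omega] at this
  rw [show a - s + (s + n - a) = n by omega] at this
  exact this.symm

theorem pvSufExt_length (l : List Int) : (pvSufExt l).length = l.length := by
  induction l with
  | nil => rfl
  | cons x xs ih =>
    cases h : pvSufExt xs with
    | nil =>
      have h0 : xs.length = 0 := by rw [h] at ih; simpa using ih.symm
      simp [pvSufExt, h, h0]
    | cons p rest =>
      obtain ⟨lo, hi⟩ := p
      simp only [pvSufExt, h, List.length_cons]
      rw [h] at ih
      simp at ih ⊢; omega

-- the suffix table bounds every element of the suffix
theorem pvSufExt_bound : ∀ (l : List Int) (j k : Nat), j ≤ k → k < l.length →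
    ((pvSufExt l).getD j (0,0)).1 ≤ l.getD k 0 ∧ l.getD k 0 ≤ ((pvSufExt l).getD j (0,0)).2 := by
  intro l
  induction l with
  | nil => intro j k _ hk; simp at hk
  | cons x xs ih =>
    intro j k hjk hk
    cases h : pvSufExt xs with
    | nil =>
      have hxs : xs.length = 0 := by have := pvSufExt_length xs; rw [h] at this; simpa using this.symm
      have hx : xs = [] := List.length_eq_zero_iff.mp hxs
      subst hx
      simp at hk
      have hk0 : k = 0 := by omega
      have hj0 : j = 0 := by omega
      subst hk0; subst hj0
      simp [pvSufExt]
    | cons p rest =>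
      obtain ⟨lo, hi⟩ := p
      simp only [pvSufExt, h]
      cases j with
      | zero =>
        simp only [List.getD_cons_zero]
        cases k with
        | zero =>
          simp only [List.getD_cons_zero]
          constructor
          · exact min_le_left _ _
          · exact le_max_left _ _
        | succ k' =>
          simp only [List.getD_cons_succ]
          have := ih 0 k' (Nat.zero_le _) (by simp at hk; omega)
          rw [h] at this
          simp only [List.getD_cons_zero] at this
          constructor
          · exact le_trans (min_le_right _ _) this.1
          · exact le_trans this.2 (le_max_right _ _)
      | succ j' =>
        cases k with
        | zero => omega
        | succ k' =>
          simp only [List.getD_cons_succ]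
          have := ih j' k' (by omega) (by simp at hk; omega)
          rw [h] at this
          exact this

-- A's inner loop is none when no j can satisfy the index condition
theorem innerA_none (nums : List Int) (d v : Int) (i : Nat)
    (h : nums.length ≤ i + fiStep d) : fiInnerA nums d v i = none := by
  rw [fiInnerA, List.findSome?_eq_none_iff]
  intro j hj
  rw [List.mem_range'_1] at hj
  have hij : |(i:Int) - (j:Int)| = (j:Int) - (i:Int) := by
    rw [abs_sub_comm]; exact abs_of_nonneg (by omega)
  rw [if_neg]
  rintro ⟨_, hd⟩
  rw [hij] at hd
  unfold fiStep at h
  split at h <;> omega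

-- A's inner loop = the plain value scan from j0 = i + step (the index condition
-- rewrites to j ≥ j0, and j < j0 never fires)
theorem innerA_eq_scan (nums : List Int) (d v : Int) (i : Nat)
    (h : i + fiStep d ≤ nums.length) :
    fiInnerA nums d v i = fiScanB nums v i (i + fiStep d) := by
  set st := fiStep d with hst
  have hst1 : 1 ≤ st := by unfold fiStep at hst; split at hst <;> omega
  rw [fiInnerA, fiScanB]
  rw [range'_split (i+1) (i+st) (nums.length - (i+1)) (by omega) (by omega)]
  rw [List.findSome?_append]
  have h1 : (List.range' (i+1) (i + st - (i+1))).findSome? (fun (j : Nat) =>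
      if v ≤ |PySem.List.pyGetD nums (i:Int) 0 - PySem.List.pyGetD nums (j:Int) 0| ∧
         d ≤ |(i:Int) - (j:Int)| then some [(i:Int), (j:Int)] else none) = none := by
    rw [List.findSome?_eq_none_iff]
    intro j hj
    rw [List.mem_range'_1] at hj
    have hij : |(i:Int) - (j:Int)| = (j:Int) - (i:Int) := by
      rw [abs_sub_comm]; exact abs_of_nonneg (by omega)
    rw [if_neg]
    rintro ⟨_, hd⟩
    rw [hij] at hd
    unfold fiStep at hst
    split at hst <;> omega
  rw [h1, Option.none_or]
  rw [show i + 1 + (nums.length - (i+1)) - (i + st) = nums.length - (i + st) by omega]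
  apply findSome?_congr'
  intro j hj
  rw [List.mem_range'_1] at hj
  have hij : |(i:Int) - (j:Int)| = (j:Int) - (i:Int) := by
    rw [abs_sub_comm]; exact abs_of_nonneg (by omega)
  have hd : d ≤ |(i:Int) - (j:Int)| := by
    rw [hij]
    unfold fiStep at hst
    split at hst <;> omega
  by_cases hv : v ≤ |PySem.List.pyGetD nums (i:Int) 0 - PySem.List.pyGetD nums (j:Int) 0|
  · rw [if_pos ⟨hv, hd⟩, if_pos hv]
  · rw [if_neg (by rintro ⟨h1, _⟩; exact hv h1), if_neg hv]

-- when the guard is false the scan finds nothing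
theorem scan_none_of_guard_false (nums : List Int) (v : Int) (i j0 : Nat)
    (hguard : ¬ (v ≤ PySem.List.pyGetD nums (i:Int) 0 - (PySem.List.pyGetD (pvSufExt nums) (j0:Int) (0,0)).1 ∨
                 v ≤ (PySem.List.pyGetD (pvSufExt nums) (j0:Int) (0,0)).2 - PySem.List.pyGetD nums (i:Int) 0)) :
    fiScanB nums v i j0 = none := by
  rw [fiScanB, List.findSome?_eq_none_iff]
  intro j hj
  rw [List.mem_range'_1] at hj
  rw [if_neg]
  intro hv
  rw [PySem.List.pyGetD_natCast (pvSufExt nums)] at hguard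
  rw [not_or] at hguard
  obtain ⟨hlo, hhi⟩ := hguard
  have hb := pvSufExt_bound nums j0 j hj.1 (by omega)
  rw [PySem.List.pyGetD_natCast, PySem.List.pyGetD_natCast] at hv
  rw [PySem.List.pyGetD_natCast] at hlo hhi
  rcases le_abs.mp hv with h | h
  · omega
  · omega

-- per-i equality on B's outer range
theorem body_eq (nums : List Int) (d v : Int) (i : Nat)
    (h : i < nums.length - fiStep d) :
    fiInnerA nums d v i = fiBodyB nums (pvSufExt nums) d v i := by
  have hst1 : 1 ≤ fiStep d := by unfold fiStep; split <;> omega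
  have hlt : i + fiStep d < nums.length := by omega
  rw [innerA_eq_scan nums d v i (by omega)]
  rw [fiBodyB]
  split
  · rfl
  · rename_i hguard
    apply scan_none_of_guard_false nums v i (i + fiStep d)
    rw [show ((i + fiStep d : Nat) : Int) = (i:Int) + (fiStep d : Int) by push_cast; rfl]
    exact hguard

-- A's outer loop over range (n-1) equals the same loop over B's range (n - step):
-- the dropped i's all return none
theorem outer_eq (nums : List Int) (d v : Int) :
    (List.range (nums.length - 1)).findSome? (fiInnerA nums d v) =
    (List.range (nums.length - fiStep d)).findSome? (fiBodyB nums (pvSufExt nums) d v) := by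
  have hst1 : 1 ≤ fiStep d := by unfold fiStep; split <;> omega
  set n := nums.length
  have hle : n - fiStep d ≤ n - 1 := by omega
  rw [List.range_eq_range', List.range_eq_range']
  rw [range'_split 0 (n - fiStep d) (n - 1) (by omega) (by omega)]
  rw [List.findSome?_append]
  have h2 : (List.range' (n - fiStep d) (0 + (n-1) - (n - fiStep d))).findSome? (fiInnerA nums d v) = none := by
    rw [List.findSome?_eq_none_iff]
    intro i hi
    rw [List.mem_range'_1] at hi
    exact innerA_none nums d v i (by omega)
  rw [h2, Option.or_none]
  simp only [Nat.sub_zero]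
  apply findSome?_congr'
  intro i hi
  rw [List.mem_range'_1] at hi
  exact body_eq nums d v i (by omega)

-- ===== VERDICT (by name: the statement is the Claim_ definition above) =====
theorem findIndicesWithIndexAndValueDifferenceI_spec : Claim_equal_findIndicesWithIndexAndValueDifferenceI := by
  intro nums d v _
  unfold Spec_findIndicesWithIndexAndValueDifferenceI
  unfold findIndicesWithIndexAndValueDifferenceI findIndicesWithIndexAndValueDifferenceI_alt
  by_cases hC : nums.length = 1 ∧ d = 0 ∧ v = 0
  · rw [if_pos hC, if_pos hC]
  · rw [if_neg hC, if_neg hC, outer_eq]
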